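-- pv_equiv track=rewrite | github.com/clawson1717/ClawWork | capacity-weighted-ensemble/src/voting.py | _find_dissenting_agents
-- ===== SOURCE A (Python) =====
-- from typing import Dict, List, Optional, Tuple
--
-- def _find_dissenting_agents(responses: List[str]) -> List[int]:
--     """
--     Find indices of agents whose responses differ from the plurality winner.
--
--     Args:
--         responses: List of response strings
--
--     Returns:
--         List of agent indices that disagreed with the majority
--     """
--     if not responses:
--         return []
--
--     # Find plurality winner
--     response_counts: Dict[str, int] = {}
--     for response in responses:
--         normalized = response.strip()
--         response_counts[normalized] = response_counts.get(normalized, 0) + 1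
--
--     winner = max(response_counts, key=response_counts.get)
--
--     # Find dissenting agents
--     dissenting = []
--     for i, response in enumerate(responses):
--         if response.strip() != winner:
--             dissenting.append(i)
--
--     return dissenting
-- ===== SOURCE B (Python) =====
-- from typing import Dict, List, Optional, Tuple
--
-- def _find_dissenting_agents(responses: List[str]) -> List[int]:
--     """Group indices by stripped response; winner = key with the longest group
--     (first-inserted on ties, matching plurality with first-occurrence tie-break);
--     dissenters = ascending indices of every other group."""
--     if not responses:
--         return []
--
--     groups: Dict[str, List[int]] = {}
--     for i, response in enumerate(responses):
--         groups.setdefault(response.strip(), []).append(i)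
--
--     winner = max(groups, key=lambda k: len(groups[k]))
--
--     return sorted(i for val, idxs in groups.items() if val != winner for i in idxs)
-- ===== Notes on version B (the rewrite author's own statement) =====
-- stated objective: alternative
-- what changed: Instead of counting occurrences in one dict and then re-scanning all responses to collect dissenting indices, B builds a single dict grouping each stripped response to its index list, picks the winner as the longest group (insertion order preserves the first-occurrence tie-break), and returns the sorted flattened indices of the non-winner groups.
import Mathlib
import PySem

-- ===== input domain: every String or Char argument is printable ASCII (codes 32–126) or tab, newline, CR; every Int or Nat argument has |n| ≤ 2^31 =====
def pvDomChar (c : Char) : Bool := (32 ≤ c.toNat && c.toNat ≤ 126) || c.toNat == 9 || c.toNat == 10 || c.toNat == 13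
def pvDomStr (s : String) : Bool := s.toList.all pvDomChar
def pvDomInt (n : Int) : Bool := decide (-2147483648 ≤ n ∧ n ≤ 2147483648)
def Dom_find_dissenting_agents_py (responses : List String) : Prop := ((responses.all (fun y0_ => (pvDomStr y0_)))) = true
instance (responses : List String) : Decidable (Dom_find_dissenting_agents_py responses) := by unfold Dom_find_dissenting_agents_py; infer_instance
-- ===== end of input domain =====

-- B groups indices by stripped response in one dict and sorts the flattened non-winner
-- groups, instead of A's count-dict plus a second scan over all responses: alternative
-- decomposition, same asymptotic cost.

-- ===== PORT A =====
def find_dissenting_agents_py (responses : List String) : List Int :=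
  if responses = [] then []
  else
    let response_counts : PySem.Dict String Int :=
      responses.foldl (fun d r => d.modify (PySem.Str.strip r) 0 (· + 1)) PySem.Dict.empty
    match PySem.List.max? response_counts.keys (fun k => response_counts.getD k 0) with
    | none => []
    | some winner =>
      (PySem.List.enumerate responses).foldl
        (fun dissenting p => if PySem.Str.strip p.2 ≠ winner then dissenting ++ [p.1] else dissenting) []

-- ===== PORT B =====
def find_dissenting_agents_py_alt (responses : List String) : List Int :=
  if responses = [] then []
  else
    let groups : PySem.Dict String (List Int) :=
      (PySem.List.enumerate responses).foldl
        (fun d p => d.modify (PySem.Str.strip p.2) [] (· ++ [p.1])) PySem.Dict.empty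
    match PySem.List.max? groups.keys (fun k => (groups.getD k []).length) with
    | none => []
    | some winner =>
      PySem.List.sorted
        (((groups.items.filter (fun q => decide (q.1 ≠ winner))).map (·.2)).flatten)
        (fun x => x) false

-- ===== PRECONDITION & SPEC =====
def Spec_find_dissenting_agents_py (responses : List String) (out : List Int) : Prop := out = find_dissenting_agents_py_alt responses
instance (responses : List String) (out : List Int) : Decidable (Spec_find_dissenting_agents_py responses out) := by unfold Spec_find_dissenting_agents_py; infer_instance

-- ===== CLAIM (what is proved, stated in full; the proofs are below) =====
def Claim_equal_find_dissenting_agents_py : Prop := ∀ (responses : List String), Dom_find_dissenting_agents_py responses → Spec_find_dissenting_agents_py responses (find_dissenting_agents_py responses)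

-- ===== LEMMAS AND PROOFS =====

-- max? is insensitive to replacing the key function by a pointwise-equal one
theorem maxfold_congr {α κ : Type} [LT κ] [DecidableLT κ] (f g : α → κ) :
    ∀ (xs : List α) (acc : Option α), (∀ x ∈ xs, f x = g x) → (∀ m, acc = some m → f m = g m) →
      xs.foldl (fun acc x => match acc with
        | none => some x
        | some m => if f m < f x then some x else some m) acc
      = xs.foldl (fun acc x => match acc with
        | none => some x
        | some m => if g m < g x then some x else some m) acc := by
  intro xs
  induction xs with
  | nil => intro acc _ _; rfl
  | cons x t ih =>
    intro acc h hacc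
    have hx : f x = g x := h x (by simp)
    have ht : ∀ y ∈ t, f y = g y := fun y hy => h y (by simp [hy])
    cases acc with
    | none =>
      simp only [List.foldl_cons]
      apply ih _ ht
      intro m hm
      simp only [Option.some.injEq] at hm
      subst hm; exact hx
    | some m' =>
      have hm' : f m' = g m' := hacc m' rfl
      simp only [List.foldl_cons, hm', hx]
      apply ih _ ht
      intro m hm
      by_cases hc : g m' < g x
      · simp only [if_pos hc, Option.some.injEq] at hm; subst hm; exact hx
      · simp only [if_neg hc, Option.some.injEq] at hm; subst hm; exact hacc m' rfl

theorem max?_congr_key {α κ : Type} [LT κ] [DecidableLT κ] (xs : List α) (f g : α → κ)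
    (h : ∀ x ∈ xs, f x = g x) :
    PySem.List.max? xs f = PySem.List.max? xs g := by
  unfold PySem.List.max?
  exact maxfold_congr f g xs none h (by simp)

-- replacing an Int-cast key by the Nat key does not change max?
theorem max?_cast_key {α : Type} (xs : List α) (g : α → Nat) :
    PySem.List.max? xs (fun x => ((g x : Nat) : Int)) = PySem.List.max? xs g := by
  unfold PySem.List.max?
  suffices H : ∀ (acc : Option α),
      xs.foldl (fun acc x => match acc with
        | none => some x
        | some m => if ((g m : Nat) : Int) < ((g x : Nat) : Int) then some x else some m) acc
      = xs.foldl (fun acc x => match acc with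
        | none => some x
        | some m => if g m < g x then some x else some m) acc by
    exact H none
  induction xs with
  | nil => intro acc; rfl
  | cons x t ih =>
    intro acc
    have hstep : (match acc with
        | none => some x
        | some m => if ((g m : Nat) : Int) < ((g x : Nat) : Int) then some x else some m)
      = (match acc with
        | none => some x
        | some m => if g m < g x then some x else some m) := by
      cases acc with
      | none => rfl
      | some m => simp [Nat.cast_lt]
    simp only [List.foldl_cons, hstep, ih]

-- splitting a list into its key-classes over a Nodup key list is a permutation of the filter
theorem flatten_filter_classes_perm {κ α : Type} [DecidableEq κ] (M : List α) (key : α → κ) :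
    ∀ (ks : List κ), ks.Nodup →
      ((ks.map (fun c => M.filter (fun x => decide (key x = c)))).flatten).Perm
        (M.filter (fun x => decide (key x ∈ ks))) := by
  intro ks
  induction ks with
  | nil => intro _; simp
  | cons c t ih =>
    intro hnd
    have hc : c ∉ t := (List.nodup_cons.mp hnd).1
    have hnd' : t.Nodup := (List.nodup_cons.mp hnd).2
    simp only [List.map_cons, List.flatten_cons]
    have h1 : (M.filter (fun x => decide (key x ∈ c :: t))).filter (fun x => decide (key x = c))
        = M.filter (fun x => decide (key x = c)) := by
      rw [List.filter_filter]
      apply List.filter_congr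
      intro x _
      by_cases h : key x = c <;> simp [h]
    have h2 : (M.filter (fun x => decide (key x ∈ c :: t))).filter (fun x => !decide (key x = c))
        = M.filter (fun x => decide (key x ∈ t)) := by
      rw [List.filter_filter]
      apply List.filter_congr
      intro x _
      by_cases h : key x = c
      · subst h; simp [hc]
      · by_cases h' : key x ∈ t <;> simp [h, h']
    have hpart := List.filter_append_perm (fun x => decide (key x = c))
      (M.filter (fun x => decide (key x ∈ c :: t)))
    rw [h1, h2] at hpart
    exact ((List.Perm.append_left _ (ih hnd')).trans hpart)

-- ===== VERDICT (by name: the statement is the Claim_ definition above) =====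
theorem find_dissenting_agents_py_spec : Claim_equal_find_dissenting_agents_py := by
  intro responses _
  unfold Spec_find_dissenting_agents_py find_dissenting_agents_py find_dissenting_agents_py_alt
  by_cases hr : responses = []
  · simp [hr]
  simp only [if_neg hr]
  -- common notation
  set S : List String := responses.map PySem.Str.strip with hS
  set E : List (Int × String) := PySem.List.enumerate responses with hE
  set M : List (String × Int) := E.map (fun p => (PySem.Str.strip p.2, p.1)) with hM
  -- A's count dict is counter S
  have hcounts : responses.foldl (fun d r => d.modify (PySem.Str.strip r) 0 (· + 1)) PySem.Dict.empty
      = PySem.Dict.counter S := by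
    rw [PySem.Dict.counter_eq_foldl, hS, List.foldl_map]
  -- B's group dict
  set G : PySem.Dict String (List Int) :=
      E.foldl (fun d p => d.modify (PySem.Str.strip p.2) [] (· ++ [p.1])) PySem.Dict.empty with hG
  have hGM : G = M.foldl (fun d q => d.modify q.1 [] (· ++ [q.2])) PySem.Dict.empty := by
    rw [hG, hM, List.foldl_map]
  have hMfst : M.map (·.1) = S := by
    rw [hM, hS, List.map_map, ← PySem.List.map_snd_enumerate responses 0, ← hE, List.map_map]
    rfl
  have hGkeys : G.keys = PySem.Set.ofList S := by
    rw [hG, PySem.Dict.keys_foldl_modify_key]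
    rw [PySem.Dict.keys_empty]
    rw [show E.map (fun p => PySem.Str.strip p.2) = S from by rw [← hMfst, hM, List.map_map]; rfl]
    rfl
  have hGgetD : ∀ c, G.getD c [] = (M.filter (fun q => decide (q.1 = c))).map (·.2) := by
    intro c
    rw [hGM]
    rw [show (M.filter (fun q => decide (q.1 = c))) = (M.filter (fun q => q.1 == c)) from
      List.filter_congr (fun q _ => by by_cases h : q.1 = c <;> simp [h])]
    rw [PySem.Dict.getD_foldl_modify_append]
    simp
  have hGlen : ∀ c, (G.getD c []).length = S.count c := by
    intro c
    have hcp : List.countP (fun q => decide (q.1 = c)) M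
        = List.countP (fun x => x == c) (M.map (·.1)) := by
      refine (List.countP_congr ?_).trans List.countP_map.symm
      intro q _
      by_cases h : q.1 = c <;> simp [h, Function.comp]
    rw [hGgetD c, List.length_map, ← List.countP_eq_length_filter, hcp, hMfst, List.count]
  -- the two max? computations agree
  have hmax : PySem.List.max? (PySem.Dict.counter S).keys (fun k => (PySem.Dict.counter S).getD k 0)
      = PySem.List.max? G.keys (fun k => (G.getD k []).length) := by
    rw [PySem.Dict.keys_counter, hGkeys]
    rw [max?_congr_key (PySem.Set.ofList S) _ (fun k => ((S.count k : Nat) : Int))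
      (fun k _ => by rw [PySem.Dict.getD_counter])]
    rw [max?_cast_key]
    exact max?_congr_key (PySem.Set.ofList S) _ _ (fun k _ => (hGlen k).symm)
  rw [hcounts, hmax]
  cases hw : PySem.List.max? G.keys (fun k => (G.getD k []).length) with
  | none => rfl
  | some w =>
    dsimp only
    -- A's dissent loop is a filtered map of the enumeration
    have hA : E.foldl (fun dissenting p =>
          if PySem.Str.strip p.2 ≠ w then dissenting ++ [p.1] else dissenting) []
        = (E.filter (fun p => decide (PySem.Str.strip p.2 ≠ w))).map (·.1) := by
      rw [show (fun (dissenting : List Int) (p : Int × String) =>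
            if PySem.Str.strip p.2 ≠ w then dissenting ++ [p.1] else dissenting)
          = (fun dissenting p =>
            if decide (PySem.Str.strip p.2 ≠ w) = true then dissenting ++ [p.1] else dissenting) from by
        funext acc p; by_cases h : PySem.Str.strip p.2 = w <;> simp [h]]
      rw [PySem.List.foldl_append_if]
      simp
    rw [hA]
    -- A's list rewritten over M
    have hAM : (E.filter (fun p => decide (PySem.Str.strip p.2 ≠ w))).map (·.1)
        = (M.filter (fun q => decide (q.1 ≠ w))).map (·.2) := by
      rw [hM, List.filter_map, List.map_map]
      rfl
    -- B's flatten is a permutation of A's list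
    set ks : List String := (PySem.Set.ofList S).filter (fun k => decide (k ≠ w)) with hks
    have hnodup : G.keys.Nodup := by
      rw [hG]
      exact PySem.Dict.nodup_keys_foldl_modify_key _ _ _ _ _ PySem.Dict.nodup_keys_empty
    have hitems : ((G.items.filter (fun q => decide (q.1 ≠ w))).map (·.2))
        = ks.map (fun k => G.getD k []) := by
      rw [PySem.Dict.items_eq_map_keys G hnodup [], List.filter_map, List.map_map, hGkeys, hks]
      rfl
    have hwmem : w ∈ PySem.Set.ofList S := by
      rw [← hGkeys]; exact PySem.List.max?_mem hw
    have hperm : (((G.items.filter (fun q => decide (q.1 ≠ w))).map (·.2)).flatten).Perm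
        ((M.filter (fun q => decide (q.1 ≠ w))).map (·.2)) := by
      rw [hitems]
      rw [show ks.map (fun k => G.getD k [])
          = (ks.map (fun c => M.filter (fun q => decide (q.1 = c)))).map (List.map (·.2)) from by
        rw [List.map_map]; exact List.map_congr_left (fun c _ => hGgetD c)]
      rw [← List.map_flatten]
      apply List.Perm.map
      have hknd : ks.Nodup := List.Nodup.filter _ (PySem.Set.nodup_ofList S)
      have := flatten_filter_classes_perm M (·.1) ks hknd
      refine this.trans (List.Perm.of_eq (List.filter_congr ?_))
      intro q hq
      have hqS : q.1 ∈ S := by rw [← hMfst]; exact List.mem_map_of_mem hq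
      by_cases h : q.1 = w
      · subst h
        simp [hks]
      · have : q.1 ∈ ks := by
          rw [hks, List.mem_filter]
          exact ⟨(PySem.Set.mem_ofList _ _).mpr hqS, by simp [h]⟩
        simp [this, h]
    -- A's list is strictly increasing
    have hpw : ((M.filter (fun q => decide (q.1 ≠ w))).map (·.2)).Pairwise (· < ·) := by
      rw [← hAM]
      rw [List.pairwise_map]
      exact List.Pairwise.sublist List.filter_sublist (PySem.List.pairwise_lt_enumerate responses 0)
    rw [hAM]
    exact (PySem.List.sorted_eq_of_perm_of_pairwise_lt _ _ (fun x => x) hperm.symm hpw).symm
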